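-- pv_equiv track=rewrite | github.com/smit-kukadiya/data-compression | lz78-algorithm.py | decompress_lz78
-- ===== SOURCE A (Python) =====
-- def decompress_lz78(compressed_data):
--     dictionary = [""]
--     decompressed_string = ""
--
--     for index, char in compressed_data:
--         entry = dictionary[index] + char
--         dictionary.append(entry)
--         decompressed_string += entry
--
--     return decompressed_string
-- ===== SOURCE B (Python) =====
-- def decompress_lz78(compressed_data):
--     # Dictionary entries are (start, length) spans into the output buffer,
--     # never materialized as strings; entry 0 is the empty span.
--     spans = [(0, 0)]
--     out = []
--     for index, char in compressed_data:
--         start, length = spans[index]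
--         entry = "".join(out[start:start + length]) + char
--         spans.append((len(out), length + len(char)))
--         out.extend(entry)
--     return "".join(out)
-- ===== Notes on version B (the rewrite author's own statement) =====
-- stated objective: alternative
-- what changed: B represents dictionary entries as (start, length) spans into the growing output buffer and rebuilds each entry by slicing that buffer, instead of storing materialized strings; Pre_ excludes only inputs on which A raises IndexError (an out-of-range index).
import Mathlib
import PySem

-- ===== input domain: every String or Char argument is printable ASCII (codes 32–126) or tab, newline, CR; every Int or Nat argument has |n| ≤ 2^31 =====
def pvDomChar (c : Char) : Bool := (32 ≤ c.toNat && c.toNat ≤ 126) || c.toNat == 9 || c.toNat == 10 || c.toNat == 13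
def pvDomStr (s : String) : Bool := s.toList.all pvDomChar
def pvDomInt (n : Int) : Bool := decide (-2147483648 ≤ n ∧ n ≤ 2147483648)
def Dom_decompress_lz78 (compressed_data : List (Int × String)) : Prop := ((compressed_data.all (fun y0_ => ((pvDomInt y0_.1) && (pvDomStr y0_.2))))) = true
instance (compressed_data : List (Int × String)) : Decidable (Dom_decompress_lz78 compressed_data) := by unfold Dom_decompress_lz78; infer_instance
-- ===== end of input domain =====

-- B keeps the dictionary as (start, length) spans into the output buffer instead of materialized
-- strings (alternative data structure, same asymptotic cost).

-- ===== PORT A =====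
-- dictionary[index] is in range on every input admitted by Pre_; pyGetD is exact there.
def decompress_lz78 (compressed_data : List (Int × String)) : String :=
  (compressed_data.foldl (fun (st : List String × String) p =>
    let entry := PySem.List.pyGetD st.1 p.1 "" ++ p.2
    (st.1 ++ [entry], st.2 ++ entry)) (([""] : List String), "")).2

-- ===== PORT B =====
-- state = (spans, out): spans[j] = (start, length) of dictionary entry j inside out (a char buffer)
def decompress_lz78_alt (compressed_data : List (Int × String)) : String :=
  let st := compressed_data.foldl (fun (st : List (Nat × Nat) × List Char) p =>
    let sl := PySem.List.pyGetD st.1 p.1 (0, 0)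
    let entry := PySem.List.slice st.2 (some (sl.1 : Int)) (some ((sl.1 + sl.2 : Nat) : Int))
                   ++ p.2.toList
    (st.1 ++ [(st.2.length, sl.2 + p.2.toList.length)], st.2 ++ entry))
    ([(0, 0)], ([] : List Char))
  String.ofList st.2

-- ===== PRECONDITION & SPEC =====
-- Pre_ excludes exactly the inputs on which A raises IndexError: at step k the dictionary has
-- k+1 entries, so the index must satisfy -(k+1) ≤ index ≤ k.
def Pre_decompress_lz78 (compressed_data : List (Int × String)) : Prop :=
  ∀ k (h : k < compressed_data.length),
    -((k : Int) + 1) ≤ (compressed_data[k]).1 ∧ (compressed_data[k]).1 ≤ (k : Int)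
instance (compressed_data : List (Int × String)) : Decidable (Pre_decompress_lz78 compressed_data) := by unfold Pre_decompress_lz78; infer_instance

def pvWitness_decompress_lz78 : (List (Int × String)) := [(0, "a"), (1, "b"), (-1, "c")]

def Spec_decompress_lz78 (compressed_data : List (Int × String)) (out : String) : Prop := out = decompress_lz78_alt compressed_data
instance (compressed_data : List (Int × String)) (out : String) : Decidable (Spec_decompress_lz78 compressed_data out) := by unfold Spec_decompress_lz78; infer_instance

-- ===== CLAIM (what is proved, stated in full; the proofs are below) =====
def Claim_equal_decompress_lz78 : Prop := ∀ (compressed_data : List (Int × String)), Dom_decompress_lz78 compressed_data → Pre_decompress_lz78 compressed_data → Spec_decompress_lz78 compressed_data (decompress_lz78 compressed_data)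

-- ===== LEMMAS AND PROOFS =====

-- the two fold steps, named for the proofs
def pvStepA (st : List String × String) (p : Int × String) : List String × String :=
  let entry := PySem.List.pyGetD st.1 p.1 "" ++ p.2
  (st.1 ++ [entry], st.2 ++ entry)

def pvStepB (st : List (Nat × Nat) × List Char) (p : Int × String) : List (Nat × Nat) × List Char :=
  let sl := PySem.List.pyGetD st.1 p.1 (0, 0)
  let entry := PySem.List.slice st.2 (some (sl.1 : Int)) (some ((sl.1 + sl.2 : Nat) : Int))
                 ++ p.2.toList
  (st.1 ++ [(st.2.length, sl.2 + p.2.toList.length)], st.2 ++ entry)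

theorem pvA_eq_foldl (l : List (Int × String)) :
    decompress_lz78 l = (l.foldl pvStepA (([""] : List String), "")).2 := rfl

theorem pvB_eq_foldl (l : List (Int × String)) :
    decompress_lz78_alt l = String.ofList (l.foldl pvStepB ([(0, 0)], ([] : List Char))).2 := rfl

-- Python indexing with a possibly negative in-range index, normalized to a Nat position
theorem pvGetD_norm {α : Type} (xs : List α) (d : α) (idx : Int)
    (hlo : -(xs.length : Int) ≤ idx) (hhi : idx ≤ (xs.length : Int) - 1) :
    PySem.List.pyGetD xs idx d =
      xs.getD (if 0 ≤ idx then idx.toNat else (idx + (xs.length : Int)).toNat) d := by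
  by_cases h : 0 ≤ idx
  · have hlt : idx < (xs.length : Int) := by omega
    rw [PySem.List.pyGetD_eq_getElem xs d h hlt, if_pos h,
        List.getD_eq_getElem xs d (by omega)]
  · have hk : idx = -(((-idx).toNat : Nat) : Int) := by omega
    rw [if_neg h, hk, PySem.List.pyGetD_neg_natCast xs _ d (by omega) (by omega),
        List.getD_eq_getElem xs d (by omega)]
    congr 1
    omega

-- drop/take of a stable prefix is unchanged by appending on the right
theorem pvTake_drop_append {α : Type} (out e : List α) (s l : Nat) (h : s + l ≤ out.length) :
    ((out ++ e).drop s).take l = (out.drop s).take l := by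
  rw [List.drop_append_of_le_length (by omega),
      List.take_append_of_le_length (by simp; omega)]

theorem pvMain :
    ∀ (l : List (Int × String)) (dict : List String) (outStr : String)
      (spans : List (Nat × Nat)) (out : List Char),
      spans.length = dict.length →
      0 < dict.length →
      out = outStr.toList →
      (∀ m (_ : m < spans.length),
        (spans[m]).1 + (spans[m]).2 ≤ out.length ∧
        ((out.drop (spans[m]).1).take (spans[m]).2) = (dict.getD m "").toList) →
      (∀ k (_ : k < l.length),
        -((dict.length : Int) + k) ≤ (l[k]).1 ∧ (l[k]).1 ≤ (dict.length : Int) + k - 1) →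
      (l.foldl pvStepA (dict, outStr)).2 = String.ofList (l.foldl pvStepB (spans, out)).2 := by
  intro l
  induction l with
  | nil =>
    intro dict outStr spans out _ _ hout _ _
    simp only [List.foldl_nil]
    rw [hout, String.ofList_toList]
  | cons p l ih =>
    intro dict outStr spans out hlen hpos hout hspan hidx
    obtain ⟨idx, c⟩ := p
    have h0 := hidx 0 (by simp)
    simp only [List.getElem_cons_zero, Nat.cast_zero, add_zero] at h0
    set n := spans.length with hn
    set i : Nat := if 0 ≤ idx then idx.toNat else (idx + (n : Int)).toNat with hi
    have hin : i < n := by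
      rcases h0 with ⟨hlo, hhi⟩
      rw [hi]; split <;> omega
    set sl := spans[i]'hin with hslval
    have hsp := hspan i hin
    simp only [← hslval] at hsp
    have hgetA : PySem.List.pyGetD dict idx "" = dict.getD i "" := by
      have e := pvGetD_norm dict "" idx (by omega) (by omega)
      rw [← hlen] at e
      rw [hi]; exact e
    have hgetB : PySem.List.pyGetD spans idx (0, 0) = sl := by
      have e := pvGetD_norm spans (0, 0) idx (by omega) (by omega)
      rw [← hn] at e
      rw [e, ← hi, List.getD_eq_getElem spans (0, 0) hin]
    set entry := dict.getD i "" ++ c with hentry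
    have hslice :
        PySem.List.slice out (some (sl.1 : Int)) (some ((sl.1 + sl.2 : Nat) : Int)) =
          (dict.getD i "").toList := by
      rw [PySem.List.slice_toNat out (by positivity) (by positivity)]
      simp only [Int.toNat_natCast]
      have : sl.1 + sl.2 - sl.1 = sl.2 := by omega
      rw [this, hsp.2]
    have hdl : (dict.getD i "").toList.length = sl.2 := by
      rw [← hsp.2, List.length_take, List.length_drop]
      omega
    have hstepA : pvStepA (dict, outStr) (idx, c) = (dict ++ [entry], outStr ++ entry) := by
      simp only [pvStepA, hgetA, hentry]
    have hstepB : pvStepB (spans, out) (idx, c) =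
        (spans ++ [(out.length, sl.2 + c.toList.length)], out ++ entry.toList) := by
      simp only [pvStepB, hgetB, hslice, hentry, String.toList_append]
    simp only [List.foldl_cons, hstepA, hstepB]
    apply ih
    · simp only [List.length_append, List.length_singleton]; omega
    · simp
    · simp [hentry, hout]
    · intro m hm
      simp only [List.length_append, List.length_singleton] at hm
      by_cases hmn : m < n
      · have eS : (spans ++ [(out.length, sl.2 + c.toList.length)])[m]'(by simp; omega) =
            spans[m]'hmn := List.getElem_append_left hmn
        have eD : (dict ++ [entry]).getD m "" = dict.getD m "" := by
          rw [List.getD_eq_getElem?_getD, List.getD_eq_getElem?_getD,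
              List.getElem?_append_left (show m < dict.length by omega)]
        have hval := hspan m hmn
        rw [eS, eD]
        refine ⟨by simp; omega, ?_⟩
        rw [pvTake_drop_append out entry.toList _ _ hval.1, hval.2]
      · have hmn' : m = n := by omega
        subst hmn'
        have eS : (spans ++ [(out.length, sl.2 + c.toList.length)])[n]'(by simp; omega) =
            (out.length, sl.2 + c.toList.length) := by
          have h1 : (spans ++ [(out.length, sl.2 + c.toList.length)])[n]? =
              some (out.length, sl.2 + c.toList.length) := by
            rw [hn]; exact List.getElem?_concat_length
          exact Option.some.inj ((List.getElem?_eq_getElem (by simp; omega)).symm.trans h1)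
        have eD : (dict ++ [entry]).getD n "" = entry := by
          rw [List.getD_eq_getElem?_getD, hlen, List.getElem?_concat_length]
          rfl
        have hel : entry.toList.length = sl.2 + c.toList.length := by
          rw [hentry, String.toList_append, List.length_append, hdl]
        rw [eS, eD]
        constructor
        · simp [hel]
        · rw [List.drop_left, List.take_of_length_le (le_of_eq hel)]
    · intro k hk
      have hK := hidx (k + 1) (by simpa using hk)
      simp only [List.getElem_cons_succ] at hK
      rcases hK with ⟨a, b⟩
      constructor
      · simp only [List.length_append, List.length_singleton]
        push_cast at a ⊢; omega
      · simp only [List.length_append, List.length_singleton]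
        push_cast at b ⊢; omega

-- ===== VERDICT (by name: the statement is the Claim_ definition above) =====
theorem decompress_lz78_spec : Claim_equal_decompress_lz78 := by
  intro l _ hPre
  unfold Spec_decompress_lz78
  rw [pvA_eq_foldl, pvB_eq_foldl]
  apply pvMain
  · rfl
  · simp
  · rfl
  · intro m hm
    simp only [List.length_singleton] at hm
    have : m = 0 := by omega
    subst this
    simp
  · intro k hk
    have hK := hPre k hk
    simp only [List.length_singleton]
    push_cast
    omega
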